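-- pv_equiv track=rewrite | github.com/emrearslandogan/homeworks | ceng111/the2/tester/tester/the2.py | rule6
-- ===== SOURCE A (Python) =====
-- def rule6(calendar, cost, final_errors): # aunt2
--
--     # finding a1's days
--     enumcalendara1 = enumerate(calendar)
--     a1days = list(filter(lambda x: x[1] == "a1", enumcalendara1))
--     a1daysfinal = [t[0] for t in a1days]
--
--     # finding a2's days
--     enumcalendara2 = enumerate(calendar)
--     a2days = list(filter(lambda x: x[1] == "a2", enumcalendara2))
--     a2daysfinal = [t[0] for t in a2days]
--
--     checking_table = [0 if (t -1) in a1daysfinal and t % 5 != 0 else 1 for t in a2daysfinal] # iterates over a2daysfinal, for an element, if it does not cause an exception it writes 1, otherwise 0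
--
--     if 0 in checking_table:
--         final_errors.append(6)
--         return cost, final_errors
--
--     else:
--         cost += len(a2daysfinal) * 27
--         return cost, final_errors
-- ===== SOURCE B (Python) =====
-- def rule6(calendar, cost, final_errors):
--     # The violation is a purely local pattern: an adjacent ("a1","a2") pair ending at a
--     # position not divisible by 5.  Scan adjacent pairs via zip; no index sets at all.
--     if any(prev == "a1" and cur == "a2" and i % 5 != 0
--            for i, (prev, cur) in enumerate(zip(calendar, calendar[1:]), 1)):
--         final_errors.append(6)
--         return cost, final_errors
--     return cost + 27 * calendar.count("a2"), final_errors
-- ===== Notes on version B (the rewrite author's own statement) =====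
-- stated objective: alternative
-- what changed: Recasts the check as a local adjacent-pair pattern: instead of building a1-index and a2-index lists and a checking table with membership tests, B zips the calendar with its own tail and looks for an adjacent ("a1","a2") pair at a position i with i%5!=0, and on success charges 27*calendar.count("a2").
import Mathlib
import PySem

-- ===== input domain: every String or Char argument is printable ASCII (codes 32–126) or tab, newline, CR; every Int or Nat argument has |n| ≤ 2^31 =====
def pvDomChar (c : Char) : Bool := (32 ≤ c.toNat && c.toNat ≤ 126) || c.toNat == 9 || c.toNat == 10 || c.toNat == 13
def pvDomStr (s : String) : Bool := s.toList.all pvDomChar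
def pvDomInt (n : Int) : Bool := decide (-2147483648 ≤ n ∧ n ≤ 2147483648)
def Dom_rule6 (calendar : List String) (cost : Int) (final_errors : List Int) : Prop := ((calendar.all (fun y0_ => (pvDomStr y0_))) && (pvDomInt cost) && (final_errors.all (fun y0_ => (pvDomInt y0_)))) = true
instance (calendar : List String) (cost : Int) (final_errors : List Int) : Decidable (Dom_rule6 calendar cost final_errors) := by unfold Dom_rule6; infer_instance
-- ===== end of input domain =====

-- B recasts A's index-set bookkeeping as a local adjacent-pair scan: zip the calendar with its
-- own tail and look for an ("a1","a2") pair ending at i with i%5 != 0; on success charge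
-- 27*count("a2") (alternative decomposition). Both sides append 6 to final_errors on a
-- violation; equivalence is about the returned value (which contains that list).

-- ===== PORT A =====
def rule6 (calendar : List String) (cost : Int) (final_errors : List Int) : Int × List Int :=
  let a1days := (PySem.List.enumerate calendar).filter (fun x => x.2 == "a1")
  let a1daysfinal := a1days.map (fun t => t.1)
  let a2days := (PySem.List.enumerate calendar).filter (fun x => x.2 == "a2")
  let a2daysfinal := a2days.map (fun t => t.1)
  let checking_table := a2daysfinal.map (fun t =>
    if (t - 1) ∈ a1daysfinal ∧ PySem.Int.mod t 5 ≠ 0 then (0 : Int) else 1)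
  if (0 : Int) ∈ checking_table then
    (cost, final_errors ++ [6])
  else
    (cost + (a2daysfinal.length : Int) * 27, final_errors)

-- ===== PORT B =====
def rule6_alt (calendar : List String) (cost : Int) (final_errors : List Int) : Int × List Int :=
  if (PySem.List.enumerate (List.zip calendar (PySem.List.slice calendar (some 1) none)) 1).any
      (fun p => p.2.1 == "a1" && p.2.2 == "a2" && decide (PySem.Int.mod p.1 5 ≠ 0)) then
    (cost, final_errors ++ [6])
  else
    (cost + 27 * (PySem.List.count calendar "a2" : Int), final_errors)

-- ===== PRECONDITION & SPEC =====
def Spec_rule6 (calendar : List String) (cost : Int) (final_errors : List Int) (out : Int × List Int) : Prop := out = rule6_alt calendar cost final_errors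
instance (calendar : List String) (cost : Int) (final_errors : List Int) (out : Int × List Int) : Decidable (Spec_rule6 calendar cost final_errors out) := by unfold Spec_rule6; infer_instance

-- ===== CLAIM =====
def Claim_equal_rule6 : Prop := ∀ (calendar : List String) (cost : Int) (final_errors : List Int), Dom_rule6 calendar cost final_errors → Spec_rule6 calendar cost final_errors (rule6 calendar cost final_errors)

-- ===== LEMMAS AND PROOFS =====

-- the common reading of the violation condition: an adjacent ("a1","a2") pair at (k, k+1), k+1 % 5 != 0
def pvViol (calendar : List String) : Prop :=
  ∃ k : Nat, ∃ _ : k + 1 < calendar.length,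
    calendar[k] = "a1" ∧ calendar[k + 1] = "a2" ∧ PySem.Int.mod ((k : Int) + 1) 5 ≠ 0

-- A's '0 in checking_table' says: some a2 day violates
theorem zero_mem_table_iff_viol (calendar : List String) :
    ((0 : Int) ∈ ((((PySem.List.enumerate calendar).filter (fun x => x.2 == "a2")).map (fun t => t.1)).map
        (fun t => if (t - 1) ∈ (((PySem.List.enumerate calendar).filter (fun x => x.2 == "a1")).map (fun t => t.1))
            ∧ PySem.Int.mod t 5 ≠ 0 then (0 : Int) else 1)))
      ↔ pvViol calendar := by
  constructor
  · intro h
    rw [List.mem_map] at h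
    obtain ⟨t, ht, hft⟩ := h
    have hcond : (t - 1) ∈ (((PySem.List.enumerate calendar).filter (fun x => x.2 == "a1")).map (fun t => t.1))
        ∧ PySem.Int.mod t 5 ≠ 0 := by
      by_contra hc; rw [if_neg hc] at hft; exact one_ne_zero hft
    obtain ⟨hmem, hmod⟩ := hcond
    rw [List.mem_map] at ht
    obtain ⟨p, hp, rfl⟩ := ht
    rw [List.mem_filter] at hp
    obtain ⟨hpe, hp2⟩ := hp
    rw [PySem.List.mem_enumerate_iff] at hpe
    obtain ⟨j, hj, rfl⟩ := hpe
    rw [List.mem_map] at hmem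
    obtain ⟨q, hq, hq1⟩ := hmem
    rw [List.mem_filter] at hq
    obtain ⟨hqe, hq2⟩ := hq
    rw [PySem.List.mem_enumerate_iff] at hqe
    obtain ⟨k, hk, rfl⟩ := hqe
    simp only [zero_add] at *
    have hjk : j = k + 1 := by omega
    subst hjk
    exact ⟨k, hj, by simpa using hq2, by simpa using hp2, by simpa using hmod⟩
  · rintro ⟨k, hk, h1, h2, hm⟩
    rw [List.mem_map]
    refine ⟨((k : Int) + 1), ?_, ?_⟩
    · rw [List.mem_map]
      refine ⟨((k : Int) + 1, calendar[k + 1]), ?_, rfl⟩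
      rw [List.mem_filter]
      exact ⟨(PySem.List.mem_enumerate_iff _ _ _).mpr ⟨k + 1, hk, by simp⟩, by simp [h2]⟩
    · have hmem : ((k : Int) + 1 - 1) ∈ (((PySem.List.enumerate calendar).filter (fun x => x.2 == "a1")).map (fun t => t.1)) := by
        rw [List.mem_map]
        refine ⟨((k : Int), calendar[k]), ?_, by omega⟩
        rw [List.mem_filter]
        exact ⟨(PySem.List.mem_enumerate_iff _ _ _).mpr ⟨k, by omega, by simp⟩, by simp [h1]⟩
      rw [if_pos ⟨hmem, hm⟩]

-- B's any-over-zipped-pairs says the same thing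
theorem any_pairs_iff_viol (calendar : List String) :
    ((PySem.List.enumerate (List.zip calendar (PySem.List.slice calendar (some 1) none)) 1).any
        (fun p => p.2.1 == "a1" && p.2.2 == "a2" && decide (PySem.Int.mod p.1 5 ≠ 0)) = true)
      ↔ pvViol calendar := by
  rw [PySem.List.slice_from_one, List.any_eq_true]
  constructor
  · rintro ⟨p, hp, hpp⟩
    rw [PySem.List.mem_enumerate_iff] at hp
    obtain ⟨k, hk, rfl⟩ := hp
    simp only [List.getElem_zip, List.getElem_tail] at hpp
    simp only [Bool.and_eq_true, beq_iff_eq, decide_eq_true_eq] at hpp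
    have hlen : k + 1 < calendar.length := by
      have := hk; rw [List.length_zip, List.length_tail] at this; omega
    exact ⟨k, hlen, hpp.1.1, hpp.1.2, by rw [Int.add_comm]; exact hpp.2⟩
  · rintro ⟨k, hk, h1, h2, hm⟩
    refine ⟨(1 + (k : Int), (calendar[k], calendar.tail[k]'(by rw [List.length_tail]; omega))), ?_, ?_⟩
    · rw [PySem.List.mem_enumerate_iff]
      refine ⟨k, by rw [List.length_zip, List.length_tail]; omega, by simp [List.getElem_zip]⟩
    · simp only [Bool.and_eq_true, beq_iff_eq, decide_eq_true_eq, List.getElem_tail]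
      exact ⟨⟨h1, h2⟩, by rw [Int.add_comm]; exact hm⟩

-- A's len(a2daysfinal) is calendar.count("a2")
theorem len_a2_eq_count (calendar : List String) :
    ((((PySem.List.enumerate calendar).filter (fun x => x.2 == "a2")).map (fun t => t.1)).length : Int)
      = (PySem.List.count calendar "a2" : Int) := by
  rw [List.length_map, ← List.countP_eq_length_filter, PySem.List.count_eq, List.count_eq_countP]
  congr 1
  calc (PySem.List.enumerate calendar).countP (fun x => x.2 == "a2")
      = ((PySem.List.enumerate calendar).map (·.2)).countP (fun s => s == "a2") := by
        rw [List.countP_map]; rfl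
    _ = calendar.countP (fun s => s == "a2") := by rw [PySem.List.map_snd_enumerate]

-- ===== VERDICT =====
theorem rule6_spec : Claim_equal_rule6 := by
  intro calendar cost final_errors _
  unfold Spec_rule6 rule6 rule6_alt
  by_cases hv : pvViol calendar
  · rw [if_pos ((zero_mem_table_iff_viol calendar).mpr hv),
      if_pos ((any_pairs_iff_viol calendar).mpr hv)]
  · rw [if_neg (fun h => hv ((zero_mem_table_iff_viol calendar).mp h)),
      if_neg (by rw [Bool.not_eq_true, ← Bool.not_eq_true]
                 exact fun h => hv ((any_pairs_iff_viol calendar).mp h))]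
    rw [len_a2_eq_count]; ring_nf
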